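-- pv_equiv track=rewrite | github.com/dreierpawel/IronPythonRVT | F0-08-ManageBuildingEnvelope.py | replace_duplicates_items
-- ===== SOURCE A (Python) =====
-- from collections import defaultdict
--
-- def list_duplicates(source_list):
--     tally = defaultdict(list)
--     for i, item in enumerate(source_list):
--         tally[item].append(i)
--     return ((key, locs) for key, locs in tally.items() if len(locs) > 1)
--
-- def get_duplicates_and_index(source_list):
--     output = []
--     for duplicate in sorted(list_duplicates(source_list)):
--         output.append(duplicate)
--     return output
--
-- def add_duplicate_info_txt(source_list, added_txt = "COPY NR "):
--     output = []
--     for s in source_list: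
--         s = str(s)
--         s = added_txt + s
--         output.append(s)
--     return output
--
-- def replace_duplicates_items(source):
--     duplicates_and_index_list = get_duplicates_and_index(source)
--     for i, elem in enumerate(duplicates_and_index_list):
--         duplicate_item = elem[0]
--         duplicate_indexes = elem[1]
--         count_duplicates = len(duplicate_indexes)
--         duplicates_range_list = list(range(1, count_duplicates + 1))
--         duplicates_txt = add_duplicate_info_txt(duplicates_range_list)
--         for d, z  in zip(duplicates_txt, duplicate_indexes):
--             d = str(d) + "__" + str(duplicate_item)
--             source[z] = d
--     return source
-- ===== SOURCE B (Python) =====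
-- def replace_duplicates_items(source):
--     counts = {}
--     for item in source:
--         counts[item] = counts.get(item, 0) + 1
--     seen = {}
--     result = []
--     for item in source:
--         if counts[item] > 1:
--             n = seen.get(item, 0) + 1
--             seen[item] = n
--             result.append("COPY NR " + str(n) + "__" + item)
--         else:
--             result.append(item)
--     return result
-- ===== Notes on version B (the rewrite author's own statement) =====
-- stated objective: simpler
-- what changed: Replaces A's grouped index-lists (defaultdict of index lists, sorted duplicate groups, nested zip loop writing into the list) by one counting pass plus one flat forward pass keeping per-item running counts; B builds a fresh list instead of mutating source in place.
import Mathlib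
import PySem

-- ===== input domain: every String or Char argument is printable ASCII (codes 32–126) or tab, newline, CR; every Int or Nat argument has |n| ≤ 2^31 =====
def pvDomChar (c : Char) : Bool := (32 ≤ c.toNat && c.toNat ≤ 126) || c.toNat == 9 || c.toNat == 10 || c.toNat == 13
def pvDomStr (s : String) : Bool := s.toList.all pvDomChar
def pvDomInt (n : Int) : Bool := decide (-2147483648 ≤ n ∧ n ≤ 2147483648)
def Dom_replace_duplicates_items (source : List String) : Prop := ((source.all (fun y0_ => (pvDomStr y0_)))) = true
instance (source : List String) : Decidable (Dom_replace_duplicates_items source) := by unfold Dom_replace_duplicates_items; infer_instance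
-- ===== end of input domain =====

-- B replaces A's grouped index-lists + nested zip loop by one counting pass plus one flat scan with
-- running counts (objective: simpler). Note: Python A mutates `source` in place; B returns a fresh
-- list — the equivalence proved here is about the RETURN value.

-- ===== PORT A =====
def pyConcat (a b : String) : String := String.ofList (a.toList ++ b.toList)
def list_duplicates (source_list : List String) : List (String × List Int) :=
  let tally : PySem.Dict String (List Int) :=
    (PySem.List.enumerate source_list 0).foldl
      (fun d p => d.modify p.2 [] (fun locs => locs ++ [p.1])) PySem.Dict.empty
  tally.items.filter (fun p => 1 < p.2.length)
def get_duplicates_and_index (source_list : List String) : List (String × List Int) :=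
  (PySem.List.sorted2 (list_duplicates source_list) (fun p => p.1) (fun p => p.2)).foldl
    (fun output duplicate => output ++ [duplicate]) []
def add_duplicate_info_txt (source_list : List Int) (added_txt : String) : List String :=
  source_list.foldl (fun output s => output ++ [pyConcat added_txt (PySem.Int.toStr s)]) []
def replace_duplicates_items (source : List String) : List String :=
  let duplicates_and_index_list := get_duplicates_and_index source
  (PySem.List.enumerate duplicates_and_index_list 0).foldl
    (fun src p =>
      let elem := p.2
      let duplicate_item := elem.1
      let duplicate_indexes := elem.2
      let count_duplicates : Int := duplicate_indexes.length
      let duplicates_range_list := PySem.List.pyRange 1 (count_duplicates + 1) 1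
      let duplicates_txt := add_duplicate_info_txt duplicates_range_list "COPY NR "
      (duplicates_txt.zip duplicate_indexes).foldl
        (fun src q =>
          let d := pyConcat (pyConcat q.1 "__") duplicate_item
          src.set q.2.toNat d) src)
    source

-- ===== PORT B =====
def alt_counts (source : List String) : PySem.Dict String Int :=
  source.foldl (fun d x => d.insert x (d.getD x 0 + 1)) PySem.Dict.empty
def alt_go (counts : PySem.Dict String Int) (seen : PySem.Dict String Int) :
    List String → List String
  | [] => []
  | item :: rest =>
    if 1 < counts.getD item 0 then
      let n := seen.getD item 0 + 1
      pyConcat (pyConcat (pyConcat "COPY NR " (PySem.Int.toStr n)) "__") item ::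
        alt_go counts (seen.insert item n) rest
    else
      item :: alt_go counts seen rest
def replace_duplicates_items_alt (source : List String) : List String :=
  alt_go (alt_counts source) PySem.Dict.empty source

-- ===== PRECONDITION & SPEC =====
def Spec_replace_duplicates_items (source : List String) (out : List String) : Prop := out = replace_duplicates_items_alt source
instance (source : List String) (out : List String) : Decidable (Spec_replace_duplicates_items source out) := by unfold Spec_replace_duplicates_items; infer_instance

-- ===== CLAIM (what is proved, stated in full; the proofs are below) =====
def Claim_equal_replace_duplicates_items : Prop := ∀ (source : List String), Dom_replace_duplicates_items source → Spec_replace_duplicates_items source (replace_duplicates_items source)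

-- ===== LEMMAS AND PROOFS =====

-- the label both programs build, the index lists, and the common normal form of both programs
def lab (n : Int) (x : String) : String :=
  pyConcat (pyConcat (pyConcat "COPY NR " (PySem.Int.toStr n)) "__") x
def specGo (src : List String) (pre : List String) : List String → List String
  | [] => []
  | x :: rest =>
    (if 1 < src.count x then lab ((pre.count x : Int) + 1) x else x) :: specGo src (pre ++ [x]) rest
def idxs (l : List String) (s : Int) (k : String) : List Int :=
  ((PySem.List.enumerate l s).filter (fun p => p.2 == k)).map (fun p => p.1)
def updsOf (g : String × List Int) : List (Int × String) :=
  (((PySem.List.pyRange 1 ((g.2.length : Int) + 1) 1).map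
      (fun n => pyConcat "COPY NR " (PySem.Int.toStr n))).zip g.2).map
    (fun q => (q.2, pyConcat (pyConcat q.1 "__") g.1))
def applyUpd (src : List String) (q : Int × String) : List String := src.set q.1.toNat q.2


theorem alt_counts_getD (src : List String) (x : String) :
    (alt_counts src).getD x 0 = (src.count x : Int) := by
  simp [alt_counts, PySem.Dict.getD_foldl_insert_add_one]

theorem alt_go_spec (src : List String) (l pre : List String) (seen : PySem.Dict String Int)
    (h : ∀ x, 1 < src.count x → seen.getD x 0 = (pre.count x : Int)) :
    alt_go (alt_counts src) seen l = specGo src pre l := by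
  induction l generalizing pre seen with
  | nil => rfl
  | cons x rest ih =>
    rw [alt_go, specGo]
    by_cases hc : 1 < src.count x
    · have hc' : 1 < (alt_counts src).getD x 0 := by
        rw [alt_counts_getD]; exact_mod_cast hc
      rw [if_pos hc', if_pos hc]
      have hn : seen.getD x 0 + 1 = (pre.count x : Int) + 1 := by rw [h x hc]
      refine congrArg₂ _ ?_ ?_
      · show lab (seen.getD x 0 + 1) x = lab ((pre.count x : Int) + 1) x
        rw [hn]
      · show alt_go _ (seen.insert x (seen.getD x 0 + 1)) rest = _
        refine ih (pre ++ [x]) _ ?_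
        intro y hy'
        rw [PySem.Dict.getD_insert]
        by_cases hy : y = x
        · subst hy; simp [List.count_append, h y hc]
        · simp [hy, h y hy', List.count_append, Ne.symm hy]
    · have hc' : ¬ 1 < (alt_counts src).getD x 0 := by
        rw [alt_counts_getD]; exact_mod_cast hc
      rw [if_neg hc', if_neg hc]
      refine congrArg₂ _ rfl ?_
      refine ih (pre ++ [x]) seen ?_
      intro y hy'
      have hy : y ≠ x := fun he => hc (he ▸ hy')
      rw [h y hy']
      simp [List.count_append, Ne.symm hy]

-- ===== idxs facts =====
theorem idxs_cons (x : String) (l : List String) (s : Int) (k : String) :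
    idxs (x :: l) s k = (if x == k then [s] else []) ++ idxs l (s+1) k := by
  simp only [idxs, PySem.List.enumerate_cons, List.filter_cons]
  by_cases h : x == k <;> simp [h]

theorem length_idxs (l : List String) (s : Int) (k : String) :
    (idxs l s k).length = l.count k := by
  induction l generalizing s with
  | nil => rfl
  | cons x rest ih =>
    rw [idxs_cons, List.count_cons]
    by_cases h : x = k <;> simp [h, ih]

theorem mem_idxs (l : List String) (s : Int) (k : String) (z : Int) (hz : z ∈ idxs l s k) :
    ∃ (m : Nat) (h : m < l.length), z = s + m ∧ l[m] = k := by
  simp only [idxs, List.mem_map, List.mem_filter] at hz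
  obtain ⟨p, ⟨hp, hk⟩, hz⟩ := hz
  rw [PySem.List.mem_enumerate_iff] at hp
  obtain ⟨m, hm, rfl⟩ := hp
  exact ⟨m, hm, hz.symm, by simpa using hk⟩

theorem nodup_idxs (l : List String) (s : Int) (k : String) : (idxs l s k).Nodup := by
  have h1 : ((PySem.List.enumerate l s).filter (fun p => p.2 == k)).Pairwise (fun p q => p.1 < q.1) :=
    (PySem.List.pairwise_lt_enumerate l s).filter _
  have h2 : (idxs l s k).Pairwise (· < ·) := List.pairwise_map.mpr h1
  exact h2.nodup

theorem idxs_getElem?_count (l : List String) (s : Int) (i : Nat) (hi : i < l.length) :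
    (idxs l s (l[i]))[(l.take i).count (l[i])]? = some (s + i) := by
  induction l generalizing s i with
  | nil => simp at hi
  | cons x rest ih =>
    cases i with
    | zero => simp [idxs_cons]
    | succ j =>
      have hj : j < rest.length := by simpa using hi
      rw [idxs_cons]
      simp only [List.take_succ_cons, List.count_cons, List.getElem_cons_succ]
      by_cases hx : x = rest[j]
      · subst hx
        have := ih (s+1) j hj
        simp only [beq_self_eq_true, if_true, List.singleton_append, List.getElem?_cons_succ, this]
        congr 1
        omega
      · have hb : (x == rest[j]) = false := by simpa using hx
        have := ih (s+1) j hj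
        simp only [hb, Bool.false_eq_true, if_false, List.nil_append, Nat.add_zero, this]
        congr 1
        omega

-- ===== tally / list_duplicates =====
theorem list_duplicates_eq (source : List String) :
    list_duplicates source =
      ((PySem.Set.ofList source).filter (fun k => 1 < source.count k)).map
        (fun k => (k, idxs source 0 k)) := by
  have hfold :
      (PySem.List.enumerate source 0).foldl
          (fun d p => d.modify p.2 [] (fun locs => locs ++ [p.1]))
          (PySem.Dict.empty : PySem.Dict String (List Int)) =
        ((PySem.List.enumerate source 0).map Prod.swap).foldl
          (fun d q => d.modify q.1 [] (fun locs => locs ++ [q.2])) PySem.Dict.empty := by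
    rw [List.foldl_map]; rfl
  have hkeys :
      (((PySem.List.enumerate source 0).map Prod.swap).foldl
          (fun d q => d.modify q.1 [] (fun locs => locs ++ [q.2]))
          (PySem.Dict.empty : PySem.Dict String (List Int))).keys = PySem.Set.ofList source := by
    rw [PySem.Dict.keys_foldl_modify_key]
    simp only [PySem.Dict.keys_empty, List.map_map]
    rw [show ((fun (q : String × Int) => q.1) ∘ Prod.swap : (Int × String) → String) =
        (fun p => p.2) from rfl]
    rw [PySem.List.map_snd_enumerate, PySem.Set.update_nil_left]
  have hnodup :
      (((PySem.List.enumerate source 0).map Prod.swap).foldl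
          (fun d q => d.modify q.1 [] (fun locs => locs ++ [q.2]))
          (PySem.Dict.empty : PySem.Dict String (List Int))).keys.Nodup := by
    exact PySem.Dict.nodup_keys_foldl_modify_key _ _ _ _ _ PySem.Dict.nodup_keys_empty
  have hgetD : ∀ k,
      (((PySem.List.enumerate source 0).map Prod.swap).foldl
          (fun d q => d.modify q.1 [] (fun locs => locs ++ [q.2]))
          (PySem.Dict.empty : PySem.Dict String (List Int))).getD k [] = idxs source 0 k := by
    intro k
    rw [PySem.Dict.getD_foldl_modify_append]
    simp only [PySem.Dict.getD_empty, List.nil_append, List.filter_map, List.map_map, idxs]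
    rfl
  show ((PySem.List.enumerate source 0).foldl
      (fun d p => d.modify p.2 [] (fun locs => locs ++ [p.1]))
      (PySem.Dict.empty : PySem.Dict String (List Int))).items.filter
        (fun p => 1 < p.2.length) = _
  rw [hfold, PySem.Dict.items_eq_map_keys _ hnodup ([] : List Int), hkeys]
  have hmap : (PySem.Set.ofList source).map (fun k =>
      (k, (((PySem.List.enumerate source 0).map Prod.swap).foldl
          (fun d q => d.modify q.1 [] (fun locs => locs ++ [q.2]))
          (PySem.Dict.empty : PySem.Dict String (List Int))).getD k [])) =
      (PySem.Set.ofList source).map (fun k => (k, idxs source 0 k)) := by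
    exact List.map_congr_left (fun k _ => by rw [hgetD k])
  rw [hmap, List.filter_map]
  congr 1
  apply List.filter_congr
  intro k _
  simp [Function.comp, length_idxs]


-- ===== A's main loop as one flat list of (position, value) updates =====
theorem foldl_enum_snd {α β : Type} (G : β → α → β) (l : List α) (init : β) :
    (PySem.List.enumerate l 0).foldl (fun a p => G a p.2) init = l.foldl G init := by
  conv_rhs => rw [← PySem.List.map_snd_enumerate l 0]
  rw [List.foldl_map]

theorem A_unfold (source : List String) :
    replace_duplicates_items source =
      (((PySem.List.sorted2 (list_duplicates source) (fun p => p.1) (fun p => p.2)).map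
          updsOf).flatten).foldl applyUpd source := by
  have htxt : ∀ g : String × List Int,
      add_duplicate_info_txt (PySem.List.pyRange 1 ((g.2.length : Int) + 1) 1) "COPY NR " =
      (PySem.List.pyRange 1 ((g.2.length : Int) + 1) 1).map
        (fun n => pyConcat "COPY NR " (PySem.Int.toStr n)) := by
    intro g
    show List.foldl _ [] _ = _
    rw [PySem.List.foldl_append_singleton_eq_map]
    exact List.nil_append _
  have hfun : ∀ (src : List String) (p : Int × (String × List Int)),
      ((add_duplicate_info_txt (PySem.List.pyRange 1 ((p.2.2.length : Int) + 1) 1)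
          "COPY NR ").zip p.2.2).foldl
        (fun src q => src.set q.2.toNat (pyConcat (pyConcat q.1 "__") p.2.1)) src =
      (updsOf p.2).foldl applyUpd src := by
    intro src p
    rw [htxt p.2, updsOf, List.foldl_map]
    rfl
  have step1 : replace_duplicates_items source =
      (PySem.List.enumerate (get_duplicates_and_index source) 0).foldl
        (fun src p => (updsOf p.2).foldl applyUpd src) source := by
    exact congrArg
      (fun F : List String → Int × (String × List Int) → List String =>
        List.foldl F source (PySem.List.enumerate (get_duplicates_and_index source) 0))
      (funext fun src => funext fun p => hfun src p)
  have hdup : get_duplicates_and_index source =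
      PySem.List.sorted2 (list_duplicates source) (fun p => p.1) (fun p => p.2) := by
    show List.foldl _ [] _ = _
    rw [PySem.List.foldl_append_singleton]
    exact List.nil_append _
  rw [step1, hdup, foldl_enum_snd (fun src g => List.foldl applyUpd src (updsOf g)), List.foldl_flatten, List.foldl_map]

-- ===== updsOf facts =====
theorem length_updsOf (g : String × List Int) : (updsOf g).length = g.2.length := by
  simp [updsOf, PySem.List.length_pyRange_one]

theorem map_fst_updsOf (g : String × List Int) : (updsOf g).map (fun q => q.1) = g.2 := by
  rw [updsOf, List.map_map]
  have : ((fun (q : Int × String) => q.1) ∘ fun (q : String × Int) => (q.2, pyConcat (pyConcat q.1 "__") g.1)) =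
      (fun (q : String × Int) => q.2) := rfl
  rw [this]
  apply List.map_snd_zip
  simp [PySem.List.length_pyRange_one]

theorem getElem_updsOf (g : String × List Int) (j : Nat) (hj : j < g.2.length) :
    (updsOf g)[j]'(by rw [length_updsOf]; exact hj) =
      (g.2[j], lab (1 + (j : Int)) g.1) := by
  have h1 : j < (PySem.List.pyRange 1 ((g.2.length : Int) + 1) 1).length := by
    rw [PySem.List.length_pyRange_one]; omega
  simp only [updsOf, List.getElem_map, List.getElem_zip]
  rw [PySem.List.getElem_pyRange_one]
  rfl

-- ===== folding a list of (position, value) updates =====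
theorem length_foldl_applyUpd (ups : List (Int × String)) (src : List String) :
    (ups.foldl applyUpd src).length = src.length := by
  induction ups generalizing src with
  | nil => rfl
  | cons q rest ih => simp [applyUpd, ih]

theorem getElem?_foldl_applyUpd_not_mem (ups : List (Int × String)) (src : List String) (i : Nat)
    (h : ∀ q ∈ ups, q.1 ≠ (i : Int)) (hpos : ∀ q ∈ ups, 0 ≤ q.1) :
    (ups.foldl applyUpd src)[i]? = src[i]? := by
  induction ups generalizing src with
  | nil => rfl
  | cons q rest ih =>
    rw [List.foldl_cons, ih _ (fun q hq => h q (List.mem_cons_of_mem _ hq))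
      (fun q hq => hpos q (List.mem_cons_of_mem _ hq))]
    apply List.getElem?_set_ne
    have h1 := h q List.mem_cons_self
    have h2 := hpos q List.mem_cons_self
    omega

theorem getElem?_foldl_applyUpd_mem (ups : List (Int × String)) (src : List String) (i : Nat)
    (v : String) (hmem : ((i : Int), v) ∈ ups) (hnd : (ups.map (fun q => q.1)).Nodup)
    (hpos : ∀ q ∈ ups, 0 ≤ q.1) (hi : i < src.length) :
    (ups.foldl applyUpd src)[i]? = some v := by
  induction ups generalizing src with
  | nil => simp at hmem
  | cons q rest ih =>
    rw [List.foldl_cons]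
    rcases List.mem_cons.mp hmem with heq | hrest
    · subst heq
      have hnotin : ∀ p ∈ rest, p.1 ≠ (i : Int) := by
        intro p hp hpe
        have : (i : Int) ∉ rest.map (fun q => q.1) := by
          simpa using (List.nodup_cons.mp hnd).1
        exact this (hpe ▸ List.mem_map_of_mem hp)
      rw [getElem?_foldl_applyUpd_not_mem _ _ _ hnotin
        (fun q hq => hpos q (List.mem_cons_of_mem _ hq))]
      show (src.set (Int.toNat i) v)[i]? = some v
      rw [Int.toNat_natCast, List.getElem?_set_self]
      omega
    · exact ih _ hrest (List.nodup_cons.mp hnd).2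
        (fun q hq => hpos q (List.mem_cons_of_mem _ hq)) (by simp [applyUpd, hi])

-- ===== specGo elementwise =====
theorem length_specGo (src : List String) (pre l : List String) :
    (specGo src pre l).length = l.length := by
  induction l generalizing pre with
  | nil => rfl
  | cons x rest ih => simp [specGo, ih]

theorem getElem?_specGo (src : List String) (l pre : List String) (i : Nat) (hi : i < l.length) :
    (specGo src pre l)[i]? =
      some (if 1 < src.count (l[i]) then lab (((pre ++ l.take i).count (l[i]) : Int) + 1) (l[i])
            else l[i]) := by
  induction l generalizing pre i with
  | nil => simp at hi
  | cons x rest ih =>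
    cases i with
    | zero => simp [specGo]
    | succ j =>
      have hj : j < rest.length := by simpa using hi
      rw [specGo]
      simp only [List.getElem?_cons_succ, List.getElem_cons_succ, List.take_succ_cons]
      rw [ih (pre ++ [x]) j hj]
      rw [List.append_assoc]
      rfl

-- ===== assembly =====
theorem count_take_lt (s : List String) (i : Nat) (k : String) (h : i < s.length)
    (hk : s[i] = k) : (s.take i).count k < s.count k := by
  have key : s.count k = (s.take i).count k + (s.drop i).count k := by
    conv_lhs => rw [← List.take_append_drop i s]
    rw [List.count_append]
  rw [key, List.drop_eq_getElem_cons h, hk, List.count_cons]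
  simp

theorem lab_comm (n : Int) (x : String) : lab (1 + n) x = lab (n + 1) x := by
  rw [Int.add_comm]

theorem mem_sorted_groups (source : List String) (g : String × List Int)
    (hg : g ∈ PySem.List.sorted2 (list_duplicates source) (fun p => p.1) (fun p => p.2)) :
    g.1 ∈ source ∧ 1 < source.count g.1 ∧ g.2 = idxs source 0 g.1 := by
  have hmem : g ∈ list_duplicates source :=
    (PySem.List.sorted2_perm _ _ _ _).mem_iff.mp hg
  rw [list_duplicates_eq] at hmem
  obtain ⟨k, hk, rfl⟩ := List.mem_map.mp hmem
  have := List.mem_filter.mp hk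
  refine ⟨(PySem.Set.mem_ofList _ _).mp this.1, by simpa using this.2, rfl⟩

theorem mem_upds_pos (source : List String) (q : Int × String)
    (hq : q ∈ (((PySem.List.sorted2 (list_duplicates source) (fun p => p.1) (fun p => p.2)).map
        updsOf).flatten)) :
    ∃ (m : Nat) (hm : m < source.length), q.1 = (m : Int) ∧ 1 < source.count (source[m]) := by
  obtain ⟨lq, hlq, hqin⟩ := List.mem_flatten.mp hq
  obtain ⟨g, hg, rfl⟩ := List.mem_map.mp hlq
  obtain ⟨_, hcnt, hidx⟩ := mem_sorted_groups source g hg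
  have hq1 : q.1 ∈ g.2 := by
    rw [← map_fst_updsOf g]
    exact List.mem_map_of_mem hqin
  rw [hidx] at hq1
  obtain ⟨m, hm, hzm, hsm⟩ := mem_idxs source 0 g.1 q.1 hq1
  exact ⟨m, hm, by omega, by rw [hsm]; exact hcnt⟩

theorem nodup_upds (source : List String) :
    ((((PySem.List.sorted2 (list_duplicates source) (fun p => p.1) (fun p => p.2)).map
        updsOf).flatten).map (fun q => q.1)).Nodup := by
  set sortedL := PySem.List.sorted2 (list_duplicates source) (fun p => p.1) (fun p => p.2) with hsL
  rw [List.map_flatten, List.map_map]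
  have hmm : (sortedL.map ((List.map (fun q => q.1)) ∘ updsOf)) = sortedL.map (fun g => g.2) :=
    List.map_congr_left (fun g _ => map_fst_updsOf g)
  rw [hmm, List.nodup_flatten]
  constructor
  · intro l hl
    obtain ⟨g, hg, rfl⟩ := List.mem_map.mp hl
    rw [(mem_sorted_groups source g hg).2.2]
    exact nodup_idxs source 0 g.1
  · -- pairwise disjoint: distinct keys, and each position determines its key
    have hnodupkeys : (sortedL.map (fun g => g.1)).Nodup := by
      have h1 : ((list_duplicates source).map (fun g => g.1)).Nodup := by
        rw [list_duplicates_eq, List.map_map]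
        have : ((fun (g : String × List Int) => g.1) ∘
            (fun k => (k, idxs source 0 k))) = id := rfl
        rw [this, List.map_id]
        exact (PySem.Set.nodup_ofList source).filter _
      exact ((List.Perm.map (fun (g : String × List Int) => g.1) (PySem.List.sorted2_perm _ _ _ _)).nodup_iff).mpr h1
    have hpw : sortedL.Pairwise (fun g g' => g.1 ≠ g'.1) := List.pairwise_map.mp hnodupkeys
    rw [List.pairwise_map]
    refine List.Pairwise.imp_of_mem ?_ hpw
    intro g g' hg hg' hne z hz hz'
    obtain ⟨_, _, hidx⟩ := mem_sorted_groups source g hg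
    obtain ⟨_, _, hidx'⟩ := mem_sorted_groups source g' hg'
    rw [hidx] at hz; rw [hidx'] at hz'
    obtain ⟨m, hm, hzm, hsm⟩ := mem_idxs source 0 g.1 z hz
    obtain ⟨m', hm', hzm', hsm'⟩ := mem_idxs source 0 g'.1 z hz'
    have hmm' : m = m' := by omega
    subst hmm'
    exact hne (hsm ▸ hsm' ▸ rfl)

theorem mem_upds_of_dup (source : List String) (i : Nat) (hi : i < source.length)
    (hdup : 1 < source.count (source[i])) :
    ((i : Int), lab (((source.take i).count (source[i]) : Int) + 1) (source[i])) ∈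
      (((PySem.List.sorted2 (list_duplicates source) (fun p => p.1) (fun p => p.2)).map
          updsOf).flatten) := by
  set k := source[i] with hk
  set g : String × List Int := (k, idxs source 0 k) with hgdef
  have hgmem : g ∈ PySem.List.sorted2 (list_duplicates source) (fun p => p.1) (fun p => p.2) := by
    rw [(PySem.List.sorted2_perm _ _ _ _).mem_iff, list_duplicates_eq]
    refine List.mem_map.mpr ⟨k, List.mem_filter.mpr ⟨?_, by simpa using hdup⟩, rfl⟩
    exact (PySem.Set.mem_ofList _ _).mpr (List.getElem_mem hi)
  set j := (source.take i).count k with hjdef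
  have hjlt : j < g.2.length := by
    show j < (idxs source 0 k).length
    rw [length_idxs]
    exact count_take_lt source i k hi rfl
  have hval : (updsOf g)[j]'(by rw [length_updsOf]; exact hjlt) = ((i : Int), lab ((j : Int) + 1) k) := by
    rw [getElem_updsOf g j hjlt]
    have hz : g.2[j]'hjlt = (i : Int) := by
      have h? := idxs_getElem?_count source 0 i hi
      have : (idxs source 0 k)[j]? = some (0 + (i : Int)) := h?
      rw [List.getElem?_eq_some_iff] at this
      obtain ⟨hlen, hv⟩ := this
      show (idxs source 0 k)[j]'hjlt = _
      rw [hv]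
      omega
    rw [hz, lab_comm]
  refine List.mem_flatten.mpr ⟨updsOf g, List.mem_map_of_mem hgmem, ?_⟩
  rw [← hval]
  exact List.getElem_mem _

theorem not_mem_upds_of_once (source : List String) (i : Nat) (hi : i < source.length)
    (hone : ¬ 1 < source.count (source[i])) :
    ∀ q ∈ (((PySem.List.sorted2 (list_duplicates source) (fun p => p.1) (fun p => p.2)).map
        updsOf).flatten), q.1 ≠ (i : Int) := by
  intro q hq he
  obtain ⟨m, hm, hqm, hcnt⟩ := mem_upds_pos source q hq
  have : m = i := by omega
  subst this
  exact hone hcnt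

theorem A_eq_spec (source : List String) :
    replace_duplicates_items source = specGo source [] source := by
  rw [A_unfold]
  apply List.ext_getElem?
  intro i
  by_cases hi : i < source.length
  · rw [getElem?_specGo source source [] i hi, List.nil_append]
    by_cases hdup : 1 < source.count (source[i])
    · rw [if_pos hdup]
      exact getElem?_foldl_applyUpd_mem _ _ _ _ (mem_upds_of_dup source i hi hdup)
        (nodup_upds source)
        (fun q hq => by obtain ⟨m, _, hqm, _⟩ := mem_upds_pos source q hq; omega) hi
    · rw [if_neg hdup]
      rw [getElem?_foldl_applyUpd_not_mem _ _ _ (not_mem_upds_of_once source i hi hdup)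
        (fun q hq => by obtain ⟨m, _, hqm, _⟩ := mem_upds_pos source q hq; omega)]
      exact (List.getElem?_eq_getElem hi).symm ▸ rfl
  · have h1 : (((((PySem.List.sorted2 (list_duplicates source) (fun p => p.1) (fun p => p.2)).map
        updsOf).flatten)).foldl applyUpd source)[i]? = none := by
      rw [List.getElem?_eq_none_iff, length_foldl_applyUpd]
      omega
    have h2 : (specGo source [] source)[i]? = none := by
      rw [List.getElem?_eq_none_iff, length_specGo]
      omega
    rw [h1, h2]

theorem B_eq_spec (source : List String) :
    replace_duplicates_items_alt source = specGo source [] source := by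
  apply alt_go_spec
  intro x _
  simp [PySem.Dict.getD_empty]

-- ===== VERDICT (by name: the statement is the Claim_ definition above) =====
theorem replace_duplicates_items_spec : Claim_equal_replace_duplicates_items := by
  intro source _
  unfold Spec_replace_duplicates_items
  rw [A_eq_spec, B_eq_spec]
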